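-- pv_equiv track=rewrite | github.com/SandersWifeBernie/Burger-Flipping-Simulator- | burgee/affinityCalculator.py | getGrumpyAffinity
-- ===== SOURCE A (Python) =====
-- def getGrumpyAffinity(food):
--     affinity = 0
--     for item in food:
--         item = item.lower()
--         if "lettuce" in item:
--             affinity = affinity - 10
--         elif "tomato" in item:
--             affinity = affinity - 20
--         elif "mustard" in item:
--             affinity = affinity + 5
--         elif "fancy mustard" in item:
--             affinity = affinity - 25
--         elif "ketchup" in item:
--             affinity = affinity + 15
--         elif "cheese" in item:
--             affinity = affinity + 15
--         elif "beef patty" in item: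
--             affinity = affinity + 30
--         elif "buns" in item:
--             affinity = affinity + 15
--         elif "onions" in item:
--             affinity = affinity - 30
--         elif "turkey patty" in item:
--             affinity = affinity + 15
--         elif "hot sauce" in item:
--             affinity = affinity + 20
--         elif "bacon" in item:
--             affinity = affinity + 30
--         elif "pickles" in item:
--             affinity = affinity - 5
--         elif "mayo" in item:
--             affinity = affinity - 15
--         elif "relish" in item:
--             affinity = affinity - 15
--     return affinity
-- ===== SOURCE B (Python) =====
-- # B: staged passes — outer loop over the ingredient table, counting and removing
-- # matching items from a shrinking remaining list (first-match preserved by removal).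
-- _TABLE = [
--     ("lettuce", -10), ("tomato", -20), ("mustard", 5), ("fancy mustard", -25),
--     ("ketchup", 15), ("cheese", 15), ("beef patty", 30), ("buns", 15),
--     ("onions", -30), ("turkey patty", 15), ("hot sauce", 20), ("bacon", 30),
--     ("pickles", -5), ("mayo", -15), ("relish", -15),
-- ]
--
-- def getGrumpyAffinity(food):
--     remaining = [item.lower() for item in food]
--     total = 0
--     for sub, delta in _TABLE:
--         total += delta * sum(1 for it in remaining if sub in it)
--         remaining = [it for it in remaining if sub not in it]
--     return total
-- ===== Notes on version B (the rewrite author's own statement) =====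
-- stated objective: alternative
-- what changed: Inverts the loop nesting: instead of a single pass over items with a 15-branch elif chain, B makes one staged pass per (substring, delta) table entry, adding delta times the count of matching items and filtering them out of a shrinking remaining list, which preserves A's first-match order (the fancy-mustard entry stays unreachable).
import Mathlib
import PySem

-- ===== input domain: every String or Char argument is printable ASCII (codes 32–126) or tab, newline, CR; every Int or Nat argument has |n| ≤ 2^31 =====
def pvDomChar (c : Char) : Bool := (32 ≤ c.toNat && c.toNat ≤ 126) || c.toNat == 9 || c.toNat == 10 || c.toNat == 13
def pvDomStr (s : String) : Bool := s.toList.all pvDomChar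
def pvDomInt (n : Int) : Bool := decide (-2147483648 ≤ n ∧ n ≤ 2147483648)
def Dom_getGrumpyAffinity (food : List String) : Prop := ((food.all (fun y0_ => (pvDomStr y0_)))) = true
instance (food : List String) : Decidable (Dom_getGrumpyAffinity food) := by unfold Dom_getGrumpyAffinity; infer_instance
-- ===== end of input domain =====

-- B inverts the loop nesting: staged passes over a (substring, delta) table filtering a shrinking remaining list (alternative decomposition, same cost).


-- ===== PORT A =====
def getGrumpyAffinity (food : List String) : Int :=
  food.foldl (fun affinity item0 =>
    let item := PySem.Str.lower item0
    if PySem.Str.isIn "lettuce" item then affinity - 10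
    else if PySem.Str.isIn "tomato" item then affinity - 20
    else if PySem.Str.isIn "mustard" item then affinity + 5
    else if PySem.Str.isIn "fancy mustard" item then affinity - 25
    else if PySem.Str.isIn "ketchup" item then affinity + 15
    else if PySem.Str.isIn "cheese" item then affinity + 15
    else if PySem.Str.isIn "beef patty" item then affinity + 30
    else if PySem.Str.isIn "buns" item then affinity + 15
    else if PySem.Str.isIn "onions" item then affinity - 30
    else if PySem.Str.isIn "turkey patty" item then affinity + 15
    else if PySem.Str.isIn "hot sauce" item then affinity + 20
    else if PySem.Str.isIn "bacon" item then affinity + 30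
    else if PySem.Str.isIn "pickles" item then affinity - 5
    else if PySem.Str.isIn "mayo" item then affinity - 15
    else if PySem.Str.isIn "relish" item then affinity - 15
    else affinity) 0

-- ===== PORT B =====
def pvTable : List (String × Int) :=
  [("lettuce", -10), ("tomato", -20), ("mustard", 5), ("fancy mustard", -25),
   ("ketchup", 15), ("cheese", 15), ("beef patty", 30), ("buns", 15),
   ("onions", -30), ("turkey patty", 15), ("hot sauce", 20), ("bacon", 30),
   ("pickles", -5), ("mayo", -15), ("relish", -15)]

-- staged passes: for each table entry, add delta * (# matching remaining items), then drop them
def getGrumpyAffinity_alt (food : List String) : Int :=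
  (pvTable.foldl (fun (st : Int × List String) p =>
      (st.1 + p.2 * ((st.2.filter (fun it => PySem.Str.isIn p.1 it)).length : Int),
       st.2.filter (fun it => ! PySem.Str.isIn p.1 it)))
    (0, food.map (fun item => PySem.Str.lower item))).1

-- ===== PRECONDITION & SPEC =====
def Spec_getGrumpyAffinity (food : List String) (out : Int) : Prop := out = getGrumpyAffinity_alt food
instance (food : List String) (out : Int) : Decidable (Spec_getGrumpyAffinity food out) := by unfold Spec_getGrumpyAffinity; infer_instance

-- ===== CLAIM (what is proved, stated in full; the proofs are below) =====
def Claim_equal_getGrumpyAffinity : Prop := ∀ (food : List String), Dom_getGrumpyAffinity food → Spec_getGrumpyAffinity food (getGrumpyAffinity food)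

-- ===== LEMMAS AND PROOFS =====

-- first-match delta of an item against a table
def pvLookup (tbl : List (String × Int)) (item : String) : Int :=
  match tbl with
  | [] => 0
  | (s, d) :: rest => if PySem.Str.isIn s item then d else pvLookup rest item

theorem pvSum_if (p : String → Bool) (d : Int) (h : String → Int) (l : List String) :
    (l.map (fun it => if p it then d else h it)).sum =
      d * ((l.filter p).length : Int) + ((l.filter (fun it => ! p it)).map h).sum := by
  induction l with
  | nil => simp
  | cons x xs ih =>
    by_cases hx : p x
    · simp [hx, ih]; ring
    · simp [hx, ih]; ring

theorem pvFold_table (tbl : List (String × Int)) (t : Int) (rem : List String) :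
    (tbl.foldl (fun (st : Int × List String) p =>
        (st.1 + p.2 * ((st.2.filter (fun it => PySem.Str.isIn p.1 it)).length : Int),
         st.2.filter (fun it => ! PySem.Str.isIn p.1 it))) (t, rem)).1 =
      t + (rem.map (pvLookup tbl)).sum := by
  induction tbl generalizing t rem with
  | nil => simp [pvLookup]
  | cons p rest ih =>
    obtain ⟨s, d⟩ := p
    simp only [List.foldl_cons, ih]
    have hmap : rem.map (pvLookup ((s, d) :: rest)) =
        rem.map (fun it => if PySem.Str.isIn s it then d else pvLookup rest it) :=
      List.map_congr_left (fun it _ => by simp [pvLookup])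
    rw [hmap, pvSum_if]
    ring

set_option maxHeartbeats 1000000 in
theorem pvChain (affinity : Int) (b1 b2 b3 b4 b5 b6 b7 b8 b9 b10 b11 b12 b13 b14 b15 : Bool) :
    (if b1 then affinity - 10
    else if b2 then affinity - 20
    else if b3 then affinity + 5
    else if b4 then affinity - 25
    else if b5 then affinity + 15
    else if b6 then affinity + 15
    else if b7 then affinity + 30
    else if b8 then affinity + 15
    else if b9 then affinity - 30
    else if b10 then affinity + 15
    else if b11 then affinity + 20
    else if b12 then affinity + 30
    else if b13 then affinity - 5
    else if b14 then affinity - 15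
    else if b15 then affinity - 15
    else affinity) =
    affinity + (if b1 then (-10 : Int)
    else if b2 then -20
    else if b3 then 5
    else if b4 then -25
    else if b5 then 15
    else if b6 then 15
    else if b7 then 30
    else if b8 then 15
    else if b9 then -30
    else if b10 then 15
    else if b11 then 20
    else if b12 then 30
    else if b13 then -5
    else if b14 then -15
    else if b15 then -15
    else 0) := by
  by_cases h1 : b1 = true
  · simp [h1]; omega
  · simp only [h1]
    by_cases h2 : b2 = true
    · simp [h2]; omega
    · simp only [h2]
      by_cases h3 : b3 = true
      · simp [h3]
      · simp only [h3]
        by_cases h4 : b4 = true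
        · simp [h4]; omega
        · simp only [h4]
          by_cases h5 : b5 = true
          · simp [h5]
          · simp only [h5]
            by_cases h6 : b6 = true
            · simp [h6]
            · simp only [h6]
              by_cases h7 : b7 = true
              · simp [h7]
              · simp only [h7]
                by_cases h8 : b8 = true
                · simp [h8]
                · simp only [h8]
                  by_cases h9 : b9 = true
                  · simp [h9]; omega
                  · simp only [h9]
                    by_cases h10 : b10 = true
                    · simp [h10]
                    · simp only [h10]
                      by_cases h11 : b11 = true
                      · simp [h11]
                      · simp only [h11]
                        by_cases h12 : b12 = true
                        · simp [h12]
                        · simp only [h12]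
                          by_cases h13 : b13 = true
                          · simp [h13]; omega
                          · simp only [h13]
                            by_cases h14 : b14 = true
                            · simp [h14]; omega
                            · simp only [h14]
                              by_cases h15 : b15 = true
                              · simp [h15]; omega
                              · simp only [h15]
                                simp

theorem pvLookup_table (item : String) :
    pvLookup pvTable item =
    (if PySem.Str.isIn "lettuce" item then (-10 : Int)
    else if PySem.Str.isIn "tomato" item then -20
    else if PySem.Str.isIn "mustard" item then 5
    else if PySem.Str.isIn "fancy mustard" item then -25
    else if PySem.Str.isIn "ketchup" item then 15
    else if PySem.Str.isIn "cheese" item then 15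
    else if PySem.Str.isIn "beef patty" item then 30
    else if PySem.Str.isIn "buns" item then 15
    else if PySem.Str.isIn "onions" item then -30
    else if PySem.Str.isIn "turkey patty" item then 15
    else if PySem.Str.isIn "hot sauce" item then 20
    else if PySem.Str.isIn "bacon" item then 30
    else if PySem.Str.isIn "pickles" item then -5
    else if PySem.Str.isIn "mayo" item then -15
    else if PySem.Str.isIn "relish" item then -15
    else 0) := by
  simp only [pvTable, pvLookup]

theorem pvFoldlA (acc : Int) (food : List String) :
    food.foldl (fun affinity item0 =>
      let item := PySem.Str.lower item0
      if PySem.Str.isIn "lettuce" item then affinity - 10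
      else if PySem.Str.isIn "tomato" item then affinity - 20
      else if PySem.Str.isIn "mustard" item then affinity + 5
      else if PySem.Str.isIn "fancy mustard" item then affinity - 25
      else if PySem.Str.isIn "ketchup" item then affinity + 15
      else if PySem.Str.isIn "cheese" item then affinity + 15
      else if PySem.Str.isIn "beef patty" item then affinity + 30
      else if PySem.Str.isIn "buns" item then affinity + 15
      else if PySem.Str.isIn "onions" item then affinity - 30
      else if PySem.Str.isIn "turkey patty" item then affinity + 15
      else if PySem.Str.isIn "hot sauce" item then affinity + 20
      else if PySem.Str.isIn "bacon" item then affinity + 30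
      else if PySem.Str.isIn "pickles" item then affinity - 5
      else if PySem.Str.isIn "mayo" item then affinity - 15
      else if PySem.Str.isIn "relish" item then affinity - 15
      else affinity) acc
      = acc + (food.map (fun x => pvLookup pvTable (PySem.Str.lower x))).sum := by
  induction food generalizing acc with
  | nil => simp
  | cons x xs ih =>
    simp only [List.foldl_cons, List.map_cons, List.sum_cons]
    rw [ih, pvLookup_table]
    rw [pvChain acc]
    ring

-- ===== VERDICT (by name: the statement is the Claim_ definition above) =====
theorem getGrumpyAffinity_spec : Claim_equal_getGrumpyAffinity := by
  intro food _
  unfold Spec_getGrumpyAffinity getGrumpyAffinity getGrumpyAffinity_alt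
  rw [pvFold_table, pvFoldlA, List.map_map]
  simp [Function.comp_def]
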